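-- pv_equiv track=rewrite | github.com/safwansamsudeen/obsidian_to_capacities | helpers.py | stitch_links
-- ===== SOURCE A (Python) =====
-- def stitch_links(words: list[str]) -> list[str]:
--     """
--     Takes a list of splitted words and stitches together the words that are part of a link.
--     """
--     results = []
--     prev_i = 0
--     for i, word in enumerate(words):
--         # TOGGLE Handle image links too by adding `.strip('!')`
--         if word.strip('*_').startswith('[') and not word.endswith(']'):
--             invalid_link, link_opened = False, False
--             next_i = i
--             while next_i < len(words):
--                 if "](" in words[next_i]:
--                     link_opened = True
--                 if link_opened and words[next_i].strip('*_').endswith(")"):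
--                     break
--                 next_i += 1
--
--             results.extend(words[prev_i:i])
--             prev_i = next_i + 1
--             results.append(''.join(words[i:prev_i]))
--             link_opened = False
--
--     return results + words[prev_i:]
-- ===== SOURCE B (Python) =====
-- def stitch_links(words: list[str]) -> list[str]:
--     """
--     Takes a list of splitted words and stitches together the words that are part of a link.
--     """
--     n = len(words)
--     # One backward pass: end[i] = first j >= i whose word (stripped of '*_') ends with ')',
--     # jump[i] = first j >= o with that property, where o = first k >= i containing "](".
--     # Both are n when no such index exists.
--     end = [0] * (n + 1)
--     jump = [0] * (n + 1)
--     end[n] = jump[n] = n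
--     for i in range(n - 1, -1, -1):
--         end[i] = i if words[i].strip('*_').endswith(')') else end[i + 1]
--         jump[i] = end[i] if "](" in words[i] else jump[i + 1]
--     out, prev = [], 0
--     for i, word in enumerate(words):
--         if word.strip('*_').startswith('[') and not word.endswith(']'):
--             prev_new = jump[i] + 1
--             out.extend(words[prev:i])
--             out.append(''.join(words[i:prev_new]))
--             prev = prev_new
--     return out + words[prev:]
-- ===== Notes on version B (the rewrite author's own statement) =====
-- stated objective: alternative
-- what changed: Replaced A's inner forward rescan (restarted at every opening word) by one backward precomputation pass giving, for every position, the index of the word that closes a link starting there, so the main loop does a table lookup instead of a scan; on the timing inputs the cost is comparable.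
import Mathlib
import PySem

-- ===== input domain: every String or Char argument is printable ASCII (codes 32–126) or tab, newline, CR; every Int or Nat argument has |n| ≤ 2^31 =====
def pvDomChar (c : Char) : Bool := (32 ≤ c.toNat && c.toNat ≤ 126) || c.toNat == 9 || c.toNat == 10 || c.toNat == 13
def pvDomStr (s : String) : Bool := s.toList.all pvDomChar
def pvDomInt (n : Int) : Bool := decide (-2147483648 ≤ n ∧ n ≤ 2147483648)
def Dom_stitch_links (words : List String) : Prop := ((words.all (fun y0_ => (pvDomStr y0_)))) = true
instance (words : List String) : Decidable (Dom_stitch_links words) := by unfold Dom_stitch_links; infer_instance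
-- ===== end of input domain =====

-- B replaces A's restarted inner forward scan by one backward precomputation of the
-- link-closing index per position (objective: alternative algorithm); same return value.

-- ===== PORT A =====
-- word.strip('*_').startswith('[') and not word.endswith(']')
def stitchTrigA (w : String) : Bool :=
  PySem.Str.startswith (PySem.Str.stripChars w "*_") "[" && !(PySem.Str.endswith w "]")

-- the inner 'while next_i < len(words): …' scan of A, returning the final next_i
def scanA (words : List String) (nextI : Nat) (linkOpened : Bool) : Nat :=
  if h : nextI < words.length then
    let lo := linkOpened || PySem.Str.isIn "](" words[nextI]
    if lo && PySem.Str.endswith (PySem.Str.stripChars words[nextI] "*_") ")" then nextI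
    else scanA words (nextI + 1) lo
  else nextI
termination_by words.length - nextI

def stitch_links (words : List String) : List String :=
  let st := (PySem.List.enumerate words).foldl
    (fun (st : List String × Int) p =>
      if stitchTrigA p.2 then
        let nextI := scanA words p.1.toNat false
        let results := st.1 ++ PySem.List.slice words (some st.2) (some p.1)
        let prevI : Int := (nextI : Int) + 1
        (results ++ [PySem.Str.join "" (PySem.List.slice words (some p.1) (some prevI))], prevI)
      else st) ([], 0)
  st.1 ++ PySem.List.slice words (some st.2) none

-- ===== PORT B =====
def endsParenB (w : String) : Bool :=
  PySem.Str.endswith (PySem.Str.stripChars w "*_") ")"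

def hasOpenB (w : String) : Bool := PySem.Str.isIn "](" w

def stitchTrigB (w : String) : Bool :=
  PySem.Str.startswith (PySem.Str.stripChars w "*_") "[" && !(PySem.Str.endswith w "]")

-- Source B's backward pass, as structural recursion over the suffix:
-- endFromB ws = offset of the first word of ws whose stripped form ends with ')' (length if none)
def endFromB : List String → Nat
  | [] => 0
  | w :: ws => if endsParenB w then 0 else endFromB ws + 1

-- jumpFromB ws = Source B's jump[i] for the suffix ws = words[i:], relative to i
def jumpFromB : List String → Nat
  | [] => 0
  | w :: ws =>
    if hasOpenB w then (if endsParenB w then 0 else endFromB ws + 1)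
    else jumpFromB ws + 1

def stitch_links_alt (words : List String) : List String :=
  let st := (PySem.List.enumerate words).foldl
    (fun (st : List String × Int) p =>
      if stitchTrigB p.2 then
        let prevNew : Int := ((p.1.toNat + jumpFromB (words.drop p.1.toNat) : Nat) : Int) + 1
        (st.1 ++ PySem.List.slice words (some st.2) (some p.1)
              ++ [PySem.Str.join "" (PySem.List.slice words (some p.1) (some prevNew))], prevNew)
      else st) ([], 0)
  st.1 ++ PySem.List.slice words (some st.2) none

-- ===== PRECONDITION & SPEC =====
def Spec_stitch_links (words : List String) (out : List String) : Prop := out = stitch_links_alt words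
instance (words : List String) (out : List String) : Decidable (Spec_stitch_links words out) := by unfold Spec_stitch_links; infer_instance

-- ===== CLAIM (what is proved, stated in full; the proofs are below) =====
def Claim_equal_stitch_links : Prop := ∀ (words : List String), Dom_stitch_links words → Spec_stitch_links words (stitch_links words)

-- ===== LEMMAS AND PROOFS =====

lemma scanA_eq_aux (words : List String) (k : Nat) : ∀ i, words.length - i = k → i ≤ words.length →
    scanA words i true = i + endFromB (words.drop i) ∧
    scanA words i false = i + jumpFromB (words.drop i) := by
  induction k with
  | zero =>
    intro i hk hle
    have hi : i = words.length := by omega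
    subst hi
    rw [scanA, scanA]
    simp [endFromB, jumpFromB]
  | succ k ih =>
    intro i hk hle
    have hlt : i < words.length := by omega
    have hdrop : words.drop i = words[i] :: words.drop (i + 1) := List.drop_eq_getElem_cons hlt
    obtain ⟨ihT, ihF⟩ := ih (i + 1) (by omega) (by omega)
    rw [scanA, scanA]
    simp only [hlt, dif_pos, hdrop, endFromB, jumpFromB, hasOpenB, endsParenB,
      PySem.Str.endswith_eq, PySem.Str.isIn_eq, PySem.Str.stripChars]
    cases ho : PySem.Chars.isIn [']', '('] words[i].toList <;>
      cases he : PySem.Chars.endswith (PySem.Chars.stripChars words[i].toList ['*', '_']) [')'] <;>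
        refine ⟨?_, ?_⟩ <;> simp [ho, he, ihT, ihF] <;> omega

lemma scanA_eq_jump (words : List String) (i : Nat) (hle : i ≤ words.length) :
    scanA words i false = i + jumpFromB (words.drop i) :=
  (scanA_eq_aux words (words.length - i) i rfl hle).2

-- ===== VERDICT (by name: the statement is the Claim_ definition above) =====
theorem stitch_links_spec : Claim_equal_stitch_links := by
  intro words _
  unfold Spec_stitch_links stitch_links stitch_links_alt
  have hfold :
      (PySem.List.enumerate words).foldl
        (fun (st : List String × Int) p =>
          if stitchTrigA p.2 then
            let nextI := scanA words p.1.toNat false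
            let results := st.1 ++ PySem.List.slice words (some st.2) (some p.1)
            let prevI : Int := (nextI : Int) + 1
            (results ++ [PySem.Str.join "" (PySem.List.slice words (some p.1) (some prevI))], prevI)
          else st) ([], 0) =
      (PySem.List.enumerate words).foldl
        (fun (st : List String × Int) p =>
          if stitchTrigB p.2 then
            let prevNew : Int := ((p.1.toNat + jumpFromB (words.drop p.1.toNat) : Nat) : Int) + 1
            (st.1 ++ PySem.List.slice words (some st.2) (some p.1)
                  ++ [PySem.Str.join "" (PySem.List.slice words (some p.1) (some prevNew))], prevNew)
          else st) ([], 0) := by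
    apply PySem.List.foldl_congr_mem
    intro st p hp
    obtain ⟨j, hj, hpj⟩ := (PySem.List.mem_enumerate_iff _ _ _).1 hp
    subst hpj
    simp only [zero_add, stitchTrigA, stitchTrigB, Int.toNat_natCast]
    split
    · rw [scanA_eq_jump words j (le_of_lt hj)]
    · rfl
  rw [hfold]
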